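-- pv_equiv track=rewrite | github.com/luka-dev/jxe2jar | src/jxe.py | _is_method_descriptor
-- ===== SOURCE A (Python) =====
-- def _consume_field_descriptor(desc: str, idx: int) -> int:
--     """Return next index after a field descriptor starting at idx, or -1."""
--     if idx >= len(desc):
--         return -1
--     ch = desc[idx]
--     if ch == "[":
--         while idx < len(desc) and desc[idx] == "[":
--             idx += 1
--         return _consume_field_descriptor(desc, idx)
--     if ch in "BCDFIJSZ":
--         return idx + 1
--     if ch == "L":
--         end = desc.find(";", idx + 1)
--         if end == -1:
--             return -1
--         return end + 1
--     return -1
--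
-- def _is_method_descriptor(desc: str) -> bool:
--     if not desc or desc[0] != "(":
--         return False
--     idx = 1
--     while idx < len(desc) and desc[idx] != ")":
--         nxt = _consume_field_descriptor(desc, idx)
--         if nxt == -1:
--             return False
--         idx = nxt
--     if idx >= len(desc) or desc[idx] != ")":
--         return False
--     idx += 1
--     if idx >= len(desc):
--         return False
--     if desc[idx] == "V":
--         return idx + 1 == len(desc)
--     nxt = _consume_field_descriptor(desc, idx)
--     return nxt == len(desc)
-- ===== SOURCE B (Python) =====
-- def _is_method_descriptor(desc: str) -> bool:
--     # One-pass DFA over the characters instead of recursive descent with indices.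
--     START, PARAM, PARR, PCLS, RET, RARR, RCLS, DONE, REJ = range(9)
--     st = START
--     for ch in desc:
--         if st == START:
--             st = PARAM if ch == '(' else REJ
--         elif st == PARAM:
--             if ch == ')': st = RET
--             elif ch == '[': st = PARR
--             elif ch == 'L': st = PCLS
--             elif ch in 'BCDFIJSZ': st = PARAM
--             else: st = REJ
--         elif st == PARR:
--             if ch == '[': st = PARR
--             elif ch == 'L': st = PCLS
--             elif ch in 'BCDFIJSZ': st = PARAM
--             else: st = REJ
--         elif st == PCLS:
--             st = PARAM if ch == ';' else PCLS
--         elif st == RET: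
--             if ch == 'V': st = DONE
--             elif ch == '[': st = RARR
--             elif ch == 'L': st = RCLS
--             elif ch in 'BCDFIJSZ': st = DONE
--             else: st = REJ
--         elif st == RARR:
--             if ch == '[': st = RARR
--             elif ch == 'L': st = RCLS
--             elif ch in 'BCDFIJSZ': st = DONE
--             else: st = REJ
--         elif st == RCLS:
--             st = DONE if ch == ';' else RCLS
--         else:  # DONE or REJ: any extra character is invalid
--             st = REJ
--     return st == DONE
-- ===== Notes on version B (the rewrite author's own statement) =====
-- stated objective: alternative
-- what changed: Replaces the recursive-descent parser (index arithmetic, a find-based class-name scan and a -1 sentinel) with a single left-to-right pass of a 9-state finite automaton over the characters.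
import Mathlib
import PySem

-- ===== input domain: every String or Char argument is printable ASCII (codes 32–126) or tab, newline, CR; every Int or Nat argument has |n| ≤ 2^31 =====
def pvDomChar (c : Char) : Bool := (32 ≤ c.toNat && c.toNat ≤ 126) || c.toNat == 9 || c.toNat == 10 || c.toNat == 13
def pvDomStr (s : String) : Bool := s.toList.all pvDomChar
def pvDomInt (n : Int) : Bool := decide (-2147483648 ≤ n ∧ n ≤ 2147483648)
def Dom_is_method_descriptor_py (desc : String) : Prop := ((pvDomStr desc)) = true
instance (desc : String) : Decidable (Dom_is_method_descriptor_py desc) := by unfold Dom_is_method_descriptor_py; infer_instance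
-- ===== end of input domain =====

-- B replaces A's recursive-descent parser (index arithmetic, a find-based class-name scan
-- and a -1 sentinel) by a single left-to-right pass of a 9-state finite automaton (objective: alternative).

-- ===== PORT A =====
-- Python 'ch in "BCDFIJSZ"' (used by both versions)
def pvBase (c : Char) : Bool :=
  c == 'B' || c == 'C' || c == 'D' || c == 'F' || c == 'I' || c == 'J' || c == 'S' || c == 'Z'

-- hand port of Python's desc.find(";", j): first index ≥ j holding ';' (none = -1); exact on all inputs
def pvFindSemi (s : List Char) (j : Nat) : Option Nat :=
  if h : j < s.length then
    if s[j] = ';' then some j else pvFindSemi s (j + 1)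
  else none
termination_by s.length - j

-- the 'while idx < len(desc) and desc[idx] == "[":' loop of A
def pvSkip (s : List Char) (j : Nat) : Nat :=
  if h : j < s.length then
    if s[j] = '[' then pvSkip s (j + 1) else j
  else j
termination_by s.length - j

-- termination helper for pvConsume (cited by its decreasing_by)
theorem pvSkip_ge (s : List Char) (j : Nat) : j ≤ pvSkip s j := by
  fun_induction pvSkip s j with
  | case1 j h hc ih => omega
  | case2 => omega
  | case3 => omega

theorem pvSkip_gt (s : List Char) (j : Nat) (h : j < s.length) (hc : s[j] = '[') :
    j < pvSkip s j := by
  rw [pvSkip, dif_pos h, if_pos hc]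
  have := pvSkip_ge s (j + 1); omega

-- helper about the find port, used by the termination lemma pvConsume_gt below
theorem pvFindSemi_ge (s : List Char) (j : Nat) :
    ∀ e, pvFindSemi s j = some e → j ≤ e := by
  fun_induction pvFindSemi s j with
  | case1 j h hc => intro e he; simp at he; omega
  | case2 j h hc ih => intro e he; have := ih e he; omega
  | case3 j h => intro e he; simp at he

-- A's _consume_field_descriptor; the Python -1 sentinel is ported as none
def pvConsume (s : List Char) (idx : Nat) : Option Nat :=
  if h : idx < s.length then
    if hc : s[idx] = '[' then
      pvConsume s (pvSkip s idx)
    else if pvBase s[idx] then some (idx + 1)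
    else if s[idx] = 'L' then
      match pvFindSemi s (idx + 1) with
      | none => none
      | some e => some (e + 1)
    else none
  else none
termination_by s.length - idx
decreasing_by have := pvSkip_gt s idx h hc; omega

-- termination helper for pvLoop (cited by its decreasing_by)
theorem pvConsume_gt (s : List Char) (idx : Nat) :
    ∀ m, pvConsume s idx = some m → idx < m := by
  fun_induction pvConsume s idx with
  | case1 idx h hc ih =>
      intro m hm
      have h1 := ih m hm
      have h2 := pvSkip_gt s idx h hc
      omega
  | case2 idx h hc hb => intro m hm; simp at hm; omega
  | case3 idx h hc hb hl he => intro m hm; simp at hm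
  | case4 idx h hc hb hl e he =>
      intro m hm
      simp at hm
      have := pvFindSemi_ge s (idx + 1) e he
      omega
  | case5 idx h hc hb hl => intro m hm; simp at hm
  | case6 idx h => intro m hm; simp at hm

-- the tail of A after the ')' of the parameter list
def pvFinish (s : List Char) (j : Nat) : Bool :=
  if h : j < s.length then
    if s[j] = 'V' then j + 1 = s.length
    else match pvConsume s j with
      | none => false
      | some m => m = s.length
  else false

-- A's 'while idx < len(desc) and desc[idx] != ")"' loop plus the code after it
def pvLoop (s : List Char) (idx : Nat) : Bool :=
  if h : idx < s.length then
    if s[idx] = ')' then pvFinish s (idx + 1)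
    else match hm : pvConsume s idx with
      | none => false
      | some m => pvLoop s m
  else false
termination_by s.length - idx
decreasing_by have := pvConsume_gt s idx _ hm; omega

def is_method_descriptor_py (desc : String) : Bool :=
  match desc.toList with
  | [] => false
  | c :: _ => if c = '(' then pvLoop desc.toList 1 else false

-- ===== PORT B =====
inductive PvSt : Type
  | start | param | parr | pcls | ret | rarr | rcls | done | rej
deriving DecidableEq, Repr

def pvStep (st : PvSt) (c : Char) : PvSt :=
  match st with
  | .start => if c = '(' then .param else .rej
  | .param => if c = ')' then .ret
              else if c = '[' then .parr
              else if c = 'L' then .pcls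
              else if pvBase c then .param else .rej
  | .parr  => if c = '[' then .parr
              else if c = 'L' then .pcls
              else if pvBase c then .param else .rej
  | .pcls  => if c = ';' then .param else .pcls
  | .ret   => if c = 'V' then .done
              else if c = '[' then .rarr
              else if c = 'L' then .rcls
              else if pvBase c then .done else .rej
  | .rarr  => if c = '[' then .rarr
              else if c = 'L' then .rcls
              else if pvBase c then .done else .rej
  | .rcls  => if c = ';' then .done else .rcls
  | .done  => .rej
  | .rej   => .rej

def is_method_descriptor_py_alt (desc : String) : Bool :=
  desc.toList.foldl pvStep .start == .done

-- ===== PRECONDITION & SPEC =====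
def Spec_is_method_descriptor_py (desc : String) (out : Bool) : Prop := out = is_method_descriptor_py_alt desc
instance (desc : String) (out : Bool) : Decidable (Spec_is_method_descriptor_py desc out) := by unfold Spec_is_method_descriptor_py; infer_instance

-- ===== CLAIM (what is proved, stated in full; the proofs are below) =====
def Claim_equal_is_method_descriptor_py : Prop := ∀ (desc : String), Dom_is_method_descriptor_py desc → Spec_is_method_descriptor_py desc (is_method_descriptor_py desc)

-- ===== LEMMAS AND PROOFS =====

theorem foldl_rej (l : List Char) : List.foldl pvStep .rej l = .rej := by
  induction l with
  | nil => rfl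
  | cons c t ih => simpa [pvStep] using ih

theorem foldl_done (l : List Char) :
    (List.foldl pvStep .done l = .done) ↔ l = [] := by
  cases l with
  | nil => simp
  | cons c t => simp [pvStep, foldl_rej]

-- class-name scan: from a 'class' state, folding equals jumping past the first ';'
theorem cls_find (σ τ : PvSt) (hστ : ∀ c, pvStep σ c = if c = ';' then τ else σ)
    (s : List Char) (j : Nat) :
    List.foldl pvStep σ (s.drop j) =
      (match pvFindSemi s j with
       | none => σ
       | some e => List.foldl pvStep τ (s.drop (e + 1))) := by
  fun_induction pvFindSemi s j with
  | case1 j h hc =>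
      rw [List.drop_eq_getElem_cons h, List.foldl_cons, hστ, if_pos hc]
  | case2 j h hc ih =>
      rw [List.drop_eq_getElem_cons h, List.foldl_cons, hστ, if_neg hc]
      exact ih
  | case3 j h =>
      rw [List.drop_eq_nil_of_le (by omega)]
      rfl

theorem pvFindSemi_lt (s : List Char) (j : Nat) :
    ∀ e, pvFindSemi s j = some e → e < s.length := by
  fun_induction pvFindSemi s j with
  | case1 j h hc => intro e he; simp at he; omega
  | case2 j h hc ih => exact ih
  | case3 j h => intro e he; simp at he

-- '[' skipping: a state fixed by '[' is invariant over the skipped brackets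
theorem arr_skip (σ : PvSt) (hσ : pvStep σ '[' = σ) (s : List Char) (j : Nat) :
    List.foldl pvStep σ (s.drop j) = List.foldl pvStep σ (s.drop (pvSkip s j)) := by
  fun_induction pvSkip s j with
  | case1 j h hc ih =>
      rw [List.drop_eq_getElem_cons h, List.foldl_cons, hc, hσ]
      exact ih
  | case2 => rfl
  | case3 => rfl

-- the heart: consuming one field descriptor, seen from an 'array' context state
theorem consume_fold (α κ τ : PvSt)
    (hne : α ≠ .done) (hκne : κ ≠ .done)
    (h1 : pvStep α '[' = α) (h2 : pvStep α 'L' = κ)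
    (h3 : ∀ c, pvBase c = true → pvStep α c = τ)
    (h4 : ∀ c, ¬ pvBase c = true → c ≠ '[' → c ≠ 'L' → pvStep α c = .rej)
    (h5 : ∀ c, pvStep κ c = if c = ';' then τ else κ)
    (s : List Char) (j : Nat) :
    (match pvConsume s j with
      | some m => List.foldl pvStep α (s.drop j) = List.foldl pvStep τ (s.drop m) ∧ j < m ∧ m ≤ s.length
      | none => List.foldl pvStep α (s.drop j) ≠ .done) := by
  fun_induction pvConsume s j with
  | case1 j h hc ih =>
      have hskip := arr_skip α h1 s j
      cases hm : pvConsume s (pvSkip s j) with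
      | none => rw [hm] at ih; rw [hskip]; exact ih
      | some m =>
          rw [hm] at ih
          obtain ⟨he, hlt, hle⟩ := ih
          have := pvSkip_gt s j h hc
          exact ⟨by rw [hskip]; exact he, by omega, hle⟩
  | case2 j h hc hb =>
      rw [List.drop_eq_getElem_cons h, List.foldl_cons, h3 _ hb]
      exact ⟨rfl, by omega, by omega⟩
  | case3 j h hc hb hl he =>
      have hcf := cls_find κ τ h5 s (j + 1)
      rw [he] at hcf
      rw [List.drop_eq_getElem_cons h, List.foldl_cons, hl, h2, hcf]
      exact hκne
  | case4 j h hc hb hl e he =>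
      have hcf := cls_find κ τ h5 s (j + 1)
      rw [he] at hcf
      refine ⟨?_, ?_, ?_⟩
      · rw [List.drop_eq_getElem_cons h, List.foldl_cons, hl, h2, hcf]
      · have := pvFindSemi_ge s (j + 1) e he
        omega
      · have := pvFindSemi_lt s (j + 1) e he; omega
  | case5 j h hc hb hl =>
      rw [List.drop_eq_getElem_cons h, List.foldl_cons, h4 _ hb hc hl, foldl_rej]
      simp
  | case6 j h =>
      rw [List.drop_eq_nil_of_le (by omega)]
      simpa using hne

theorem pvBase_cases (c : Char) (hb : pvBase c = true) :
    c = 'B' ∨ c = 'C' ∨ c = 'D' ∨ c = 'F' ∨ c = 'I' ∨ c = 'J' ∨ c = 'S' ∨ c = 'Z' := by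
  simp [pvBase] at hb; tauto

theorem consume_param (s : List Char) (idx : Nat) (h : idx < s.length)
    (hp : s[idx] ≠ ')') :
    (match pvConsume s idx with
      | some m => List.foldl pvStep .param (s.drop idx) = List.foldl pvStep .param (s.drop m) ∧ idx < m ∧ m ≤ s.length
      | none => List.foldl pvStep .param (s.drop idx) ≠ .done) := by
  have key := consume_fold .parr .pcls .param (by simp) (by simp)
    (by simp [pvStep]) (by simp [pvStep])
    (by intro c hb; rcases pvBase_cases c hb with h|h|h|h|h|h|h|h <;> simp [h, pvStep, pvBase])
    (by intro c hb h1 h2; simp [pvStep, h1, h2, hb])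
    (by intro c; rfl) s idx
  have hfirst : List.foldl pvStep .param (s.drop idx) = List.foldl pvStep .parr (s.drop idx) := by
    rw [List.drop_eq_getElem_cons h, List.foldl_cons, List.foldl_cons]
    congr 1
    simp only [pvStep, if_neg hp]
  cases hm : pvConsume s idx with
  | none => rw [hm] at key; rw [hfirst]; exact key
  | some m => rw [hm] at key; exact ⟨by rw [hfirst]; exact key.1, key.2⟩

theorem consume_ret (s : List Char) (j : Nat) (h : j < s.length)
    (hv : s[j] ≠ 'V') :
    (match pvConsume s j with
      | some m => List.foldl pvStep .ret (s.drop j) = List.foldl pvStep .done (s.drop m) ∧ j < m ∧ m ≤ s.length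
      | none => List.foldl pvStep .ret (s.drop j) ≠ .done) := by
  have key := consume_fold .rarr .rcls .done (by simp) (by simp)
    (by simp [pvStep]) (by simp [pvStep])
    (by intro c hb; rcases pvBase_cases c hb with h|h|h|h|h|h|h|h <;> simp [h, pvStep, pvBase])
    (by intro c hb h1 h2; simp [pvStep, h1, h2, hb])
    (by intro c; rfl) s j
  have hfirst : List.foldl pvStep .ret (s.drop j) = List.foldl pvStep .rarr (s.drop j) := by
    rw [List.drop_eq_getElem_cons h, List.foldl_cons, List.foldl_cons]
    congr 1
    simp only [pvStep, if_neg hv]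
  cases hm : pvConsume s j with
  | none => rw [hm] at key; rw [hfirst]; exact key
  | some m => rw [hm] at key; exact ⟨by rw [hfirst]; exact key.1, key.2⟩

theorem finish_fold (s : List Char) (j : Nat) :
    (pvFinish s j = true) ↔ List.foldl pvStep .ret (s.drop j) = .done := by
  unfold pvFinish
  by_cases h : j < s.length
  · simp only [h, dite_true]
    by_cases hv : s[j] = 'V'
    · rw [if_pos hv, List.drop_eq_getElem_cons h, List.foldl_cons, hv,
        show pvStep PvSt.ret 'V' = PvSt.done from by decide]
      rw [foldl_done]
      simp only [decide_eq_true_eq, List.drop_eq_nil_iff]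
      omega
    · rw [if_neg hv]
      have key := consume_ret s j h hv
      cases hm : pvConsume s j with
      | none => rw [hm] at key; simp [key]
      | some m =>
          rw [hm] at key
          obtain ⟨he, _, hle⟩ := key
          rw [he, foldl_done]
          simp only [decide_eq_true_eq, List.drop_eq_nil_iff]
          omega
  · simp only [h, dite_false]
    rw [List.drop_eq_nil_of_le (by omega)]
    simp

theorem loop_fold (s : List Char) (idx : Nat) :
    (pvLoop s idx = true) ↔ List.foldl pvStep .param (s.drop idx) = .done := by
  fun_induction pvLoop s idx with
  | case1 idx h hp =>
      rw [finish_fold, List.drop_eq_getElem_cons h, List.foldl_cons, hp,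
        show pvStep PvSt.param ')' = PvSt.ret from by decide]
  | case2 idx h hp hm =>
      have key := consume_param s idx h hp
      rw [hm] at key
      simp [key]
  | case3 idx h hp m hm ih =>
      have key := consume_param s idx h hp
      rw [hm] at key
      rw [ih, key.1]
  | case4 idx h =>
      rw [List.drop_eq_nil_of_le (by omega)]
      simp

-- ===== VERDICT (by name: the statement is the Claim_ definition above) =====
theorem is_method_descriptor_py_spec : Claim_equal_is_method_descriptor_py := by
  intro desc _
  unfold Spec_is_method_descriptor_py is_method_descriptor_py is_method_descriptor_py_alt
  cases hs : desc.toList with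
  | nil => decide
  | cons c t =>
      show (if c = '(' then pvLoop (c :: t) 1 else false)
        = (List.foldl pvStep .start (c :: t) == .done)
      rw [List.foldl_cons]
      by_cases hc : c = '('
      · rw [if_pos hc, hc, show pvStep PvSt.start '(' = PvSt.param from by decide]
        rw [Bool.eq_iff_iff, beq_iff_eq]
        simpa using loop_fold ('(' :: t) 1
      · rw [if_neg hc]
        simp only [pvStep, if_neg hc, foldl_rej]
        simp
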